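-- pv_equiv track=rewrite | github.com/jeiros/advent-of-code-2017 | day_09/solution.py | clean_group
-- ===== SOURCE A (Python) =====
-- def clean_group(group):
--     group_clean = ''
--     ignore = False
--     inside_garbage = False
--     canceled_count = 0
--     for char in group:
--         if not ignore:
--             if char == '<' and not inside_garbage:
--                 inside_garbage = True
--                 canceled_count -= 1
--
--             elif char == '!':
--                 ignore = True
--
--             elif char == '>':
--                 inside_garbage = False
--
--             if not inside_garbage and char in '{}':
--                 group_clean += char
--             elif inside_garbage and char != '!':
--                 canceled_count += 1
--
--         else:
--             ignore = False
--
--     return group_clean, canceled_count  # do not count first <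
-- ===== SOURCE B (Python) =====
-- def clean_group(group):
--     # pass 1: drop every '!'-escaped character (the '!' and the char after it)
--     kept = []
--     it = iter(group)
--     for c in it:
--         if c == '!':
--             next(it, None)
--         else:
--             kept.append(c)
--     s = ''.join(kept)
--     # pass 2: alternate between normal text and garbage using str.partition
--     clean = []
--     canceled = 0
--     while s:
--         normal, lt, s = s.partition('<')
--         clean += [c for c in normal if c in '{}']
--         if lt:
--             body, _, s = s.partition('>')
--             canceled += len(body)
--     return ''.join(clean), canceled
-- ===== Notes on version B (the rewrite author's own statement) =====
-- stated objective: idiomatic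
-- what changed: Replaces the single char-by-char state machine with ignore/inside_garbage flags by two idiomatic passes: first drop every '!'-escaped character, then alternate between normal text and garbage with str.partition, filtering braces and summing garbage-body lengths.
import Mathlib
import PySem

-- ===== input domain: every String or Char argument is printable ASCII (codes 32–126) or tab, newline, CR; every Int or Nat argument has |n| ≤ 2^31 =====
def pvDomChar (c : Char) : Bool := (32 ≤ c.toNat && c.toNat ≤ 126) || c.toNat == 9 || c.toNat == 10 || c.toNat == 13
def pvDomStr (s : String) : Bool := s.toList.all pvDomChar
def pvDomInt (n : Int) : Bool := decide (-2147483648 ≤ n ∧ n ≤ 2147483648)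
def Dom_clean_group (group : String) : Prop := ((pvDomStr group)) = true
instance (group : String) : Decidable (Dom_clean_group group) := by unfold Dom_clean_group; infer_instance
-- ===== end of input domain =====

-- B replaces A's one-pass flag machine by two passes (drop '!'-escapes, then split off garbage runs); same values, no speed claim.

-- ===== PORT A =====
-- state: (group_clean, ignore, inside_garbage, canceled_count)
def cgStep (st : List Char × Bool × Bool × Int) (c : Char) : List Char × Bool × Bool × Int :=
  let (clean, ign, ing, cnt) := st
  if ign = false then
    -- first if/elif chain (may update the flags and do canceled_count -= 1)
    let s1 : Bool × Int × Bool :=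
      if c = '<' ∧ ing = false then (true, cnt - 1, ign)
      else if c = '!' then (ing, cnt, true)
      else if c = '>' then (false, cnt, ign)
      else (ing, cnt, ign)
    let ing' := s1.1
    let cnt' := s1.2.1
    let ign' := s1.2.2
    -- second if/elif chain (uses the updated flags)
    if ing' = false ∧ (c = '{' ∨ c = '}') then (clean ++ [c], ign', ing', cnt')
    else if ing' = true ∧ c ≠ '!' then (clean, ign', ing', cnt' + 1)
    else (clean, ign', ing', cnt')
  else (clean, false, ing, cnt)

def clean_group (group : String) : String × Int :=
  let st := group.toList.foldl cgStep ([], false, false, 0)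
  (String.mk st.1, st.2.2.2)

-- ===== PORT B =====
-- pass 1 of Source B: the iterator loop that drops '!' together with the following char
def cgUnesc : List Char → List Char
  | [] => []
  | c :: rest =>
    if c = '!' then
      match rest with
      | [] => []
      | _ :: r => cgUnesc r
    else c :: cgUnesc rest

-- pass 2 of Source B: the `while s` loop; s.partition('<') = (takeWhile, '<', tail of dropWhile)
def cgPass2 (s : List Char) : List Char × Int :=
  if s = [] then ([], 0)
  else
    let kept := (s.takeWhile (· ≠ '<')).filter (fun c => c == '{' || c == '}')
    match hr : s.dropWhile (· ≠ '<') with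
    | [] => (kept, 0)
    | _ :: afterLt =>
      let body := afterLt.takeWhile (· ≠ '>')
      let r := cgPass2 ((afterLt.dropWhile (· ≠ '>')).drop 1)
      (kept ++ r.1, (body.length : Int) + r.2)
termination_by s.length
decreasing_by
  have h1 : (s.dropWhile (· ≠ '<')).length ≤ s.length := List.length_dropWhile_le _ _
  rw [hr] at h1
  have h2 : (afterLt.dropWhile (· ≠ '>')).length ≤ afterLt.length := List.length_dropWhile_le _ _
  simp only [List.length_cons, List.length_drop] at *
  omega

def clean_group_alt (group : String) : String × Int :=
  let s := cgUnesc group.toList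
  let r := cgPass2 s
  (String.mk r.1, r.2)

-- ===== PRECONDITION & SPEC =====
def Spec_clean_group (group : String) (out : String × Int) : Prop := out = clean_group_alt group
instance (group : String) (out : String × Int) : Decidable (Spec_clean_group group out) := by unfold Spec_clean_group; infer_instance

-- ===== CLAIM (what is proved, stated in full; the proofs are below) =====
def Claim_equal_clean_group : Prop := ∀ (group : String), Dom_clean_group group → Spec_clean_group group (clean_group group)

-- ===== LEMMAS AND PROOFS =====

-- escape-free machine: state (clean, inside_garbage, count)
def cgStep2 (st : List Char × Bool × Int) (c : Char) : List Char × Bool × Int :=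
  let (clean, ing, cnt) := st
  if c = '<' ∧ ing = false then (clean, true, cnt)
  else if c = '>' then (clean, false, cnt)
  else if ing = false ∧ (c = '{' ∨ c = '}') then (clean ++ [c], ing, cnt)
  else if ing = true then (clean, ing, cnt + 1)
  else (clean, ing, cnt)

-- one non-'!' step of A agrees with a cgStep2 step (ignore flag stays false)
theorem cgStep_proj (clean : List Char) (ing : Bool) (cnt : Int) (c : Char) (hc : c ≠ '!') :
    cgStep (clean, false, ing, cnt) c
      = ((cgStep2 (clean, ing, cnt) c).1, false, (cgStep2 (clean, ing, cnt) c).2.1,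
         (cgStep2 (clean, ing, cnt) c).2.2) := by
  by_cases h1 : c = '<'
  · subst h1; cases ing <;> simp [cgStep, cgStep2]
  · by_cases h3 : c = '>'
    · subst h3; cases ing <;> simp [cgStep, cgStep2]
    · by_cases h4 : c = '{' ∨ c = '}'
      · rcases h4 with h | h <;> subst h <;> cases ing <;> simp [cgStep, cgStep2]
      · push_neg at h4
        cases ing <;> simp [cgStep, cgStep2, hc, h1, h3, h4.1, h4.2]

-- Lemma A: folding A's machine (ignore = false) equals folding the escape-free machine on cgUnesc
theorem foldA_unesc (s : List Char) :
    ∀ (clean : List Char) (ing : Bool) (cnt : Int),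
    (((List.foldl cgStep (clean, false, ing, cnt) s).1,
      (List.foldl cgStep (clean, false, ing, cnt) s).2.2.1,
      (List.foldl cgStep (clean, false, ing, cnt) s).2.2.2) : List Char × Bool × Int)
      = List.foldl cgStep2 (clean, ing, cnt) (cgUnesc s) := by
  induction s using cgUnesc.induct with
  | case1 => intro clean ing cnt; simp [cgUnesc]
  | case2 =>
      intro clean ing cnt
      simp [cgUnesc, cgStep]
  | case3 c2 r ih =>
      intro clean ing cnt
      have h1 : cgStep (clean, false, ing, cnt) '!' = (clean, true, ing, cnt) := by
        simp [cgStep]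
      have h2 : cgStep (clean, true, ing, cnt) c2 = (clean, false, ing, cnt) := by
        simp [cgStep]
      simp only [cgUnesc, List.foldl_cons, h1, h2]
      exact ih clean ing cnt
  | case4 c rest hc ih =>
      intro clean ing cnt
      have hu : cgUnesc (c :: rest) = c :: cgUnesc rest := by
        rw [cgUnesc.eq_def]
        simp [hc]
      rw [hu]
      simp only [List.foldl_cons, cgStep_proj clean ing cnt c hc]
      exact ih (cgStep2 (clean, ing, cnt) c).1 (cgStep2 (clean, ing, cnt) c).2.1
        (cgStep2 (clean, ing, cnt) c).2.2

-- head of a dropWhile falsifies the predicate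
theorem dropWhile_cons_head {p : Char → Bool} {l : List Char} {x : Char} {xs : List Char}
    (h : l.dropWhile p = x :: xs) : p x = false := by
  induction l with
  | nil => simp at h
  | cons a l ih =>
      rw [List.dropWhile_cons] at h
      by_cases hp : p a
      · rw [if_pos hp] at h; exact ih h
      · rw [if_neg hp] at h
        cases h
        simpa using hp

-- unfolding equations for cgPass2
theorem cgPass2_nil : cgPass2 [] = ([], 0) := by
  rw [cgPass2]; simp

theorem cgPass2_no_lt (s : List Char) (hs : s ≠ []) (hr : s.dropWhile (· ≠ '<') = []) :
    cgPass2 s = ((s.takeWhile (· ≠ '<')).filter (fun c => c == '{' || c == '}'), 0) := by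
  rw [cgPass2, if_neg hs]
  split
  · rfl
  · rename_i heq
    rw [hr] at heq
    cases heq

theorem cgPass2_lt (s : List Char) (lt : Char) (afterLt : List Char) (hs : s ≠ [])
    (hr : s.dropWhile (· ≠ '<') = lt :: afterLt) :
    cgPass2 s = ((s.takeWhile (· ≠ '<')).filter (fun c => c == '{' || c == '}')
        ++ (cgPass2 ((afterLt.dropWhile (· ≠ '>')).drop 1)).1,
      ((afterLt.takeWhile (· ≠ '>')).length : Int)
        + (cgPass2 ((afterLt.dropWhile (· ≠ '>')).drop 1)).2) := by
  rw [cgPass2, if_neg hs]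
  split
  · rename_i heq
    rw [hr] at heq
    cases heq
  · rename_i a as heq
    rw [hr] at heq
    cases heq
    rfl

-- B1: outside garbage, a '<'-free segment just contributes its braces
theorem fold2_outside (t : List Char) (ht : ∀ c ∈ t, c ≠ '<') :
    ∀ (clean : List Char) (cnt : Int),
    List.foldl cgStep2 (clean, false, cnt) t
      = (clean ++ t.filter (fun c => c == '{' || c == '}'), false, cnt) := by
  induction t with
  | nil => intro clean cnt; simp
  | cons c t ih =>
      intro clean cnt
      have hc : c ≠ '<' := ht c (by simp)
      have ht' : ∀ c ∈ t, c ≠ '<' := fun x hx => ht x (by simp [hx])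
      by_cases hb : c = '{' ∨ c = '}'
      · have hbt : (c == '{' || c == '}') = true := by
          rcases hb with h | h <;> simp [h]
        have hstep : cgStep2 (clean, false, cnt) c = (clean ++ [c], false, cnt) := by
          rcases hb with h | h <;> subst h <;> simp [cgStep2]
        rw [List.foldl_cons, hstep, ih ht', List.filter_cons, hbt]
        simp
      · push_neg at hb
        have hbt : (c == '{' || c == '}') = false := by
          simp [hb.1, hb.2]
        have hstep : cgStep2 (clean, false, cnt) c = (clean, false, cnt) := by
          simp [cgStep2, hc, hb.1, hb.2]
        rw [List.foldl_cons, hstep, ih ht', List.filter_cons, hbt]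
        simp

-- B2: inside garbage, a '>'-free segment just adds its length
theorem fold2_inside (t : List Char) (ht : ∀ c ∈ t, c ≠ '>') :
    ∀ (clean : List Char) (cnt : Int),
    List.foldl cgStep2 (clean, true, cnt) t = (clean, true, cnt + t.length) := by
  induction t with
  | nil => intro clean cnt; simp
  | cons c t ih =>
      intro clean cnt
      have hc : c ≠ '>' := ht c (by simp)
      have ht' : ∀ c ∈ t, c ≠ '>' := fun x hx => ht x (by simp [hx])
      have hstep : cgStep2 (clean, true, cnt) c = (clean, true, cnt + 1) := by
        simp [cgStep2, hc]
      simp only [List.foldl_cons, hstep, ih ht', List.length_cons, Prod.mk.injEq]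
      refine ⟨trivial, trivial, ?_⟩
      push_cast
      ring

-- Lemma B: the escape-free machine started outside garbage computes cgPass2
theorem fold2_pass2 (n : Nat) : ∀ (s : List Char), s.length ≤ n → ∀ (clean : List Char) (cnt : Int),
    (List.foldl cgStep2 (clean, false, cnt) s).1 = clean ++ (cgPass2 s).1 ∧
    (List.foldl cgStep2 (clean, false, cnt) s).2.2 = cnt + (cgPass2 s).2 := by
  induction n with
  | zero =>
      intro s hlen clean cnt
      have : s = [] := by
        cases s
        · rfl
        · simp at hlen
      subst this
      simp [cgPass2_nil]
  | succ n ih =>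
      intro s hlen clean cnt
      by_cases h0 : s = []
      · subst h0; simp [cgPass2_nil]
      · have htw : ∀ c ∈ s.takeWhile (· ≠ '<'), c ≠ '<' := by
          intro c hcmem
          have := List.mem_takeWhile_imp hcmem
          simpa using this
        rcases hd : s.dropWhile (· ≠ '<') with _ | ⟨lt, afterLt⟩
        · -- no '<' in s: the whole string is normal text
          have hsplit : s = s.takeWhile (· ≠ '<') := by
            conv_lhs => rw [← List.takeWhile_append_dropWhile (p := (· ≠ '<')) (l := s)]
            rw [hd]; simp
          have hfold : List.foldl cgStep2 (clean, false, cnt) s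
              = (clean ++ (s.takeWhile (· ≠ '<')).filter (fun c => c == '{' || c == '}'),
                 false, cnt) := by
            conv_lhs => rw [hsplit]
            rw [fold2_outside _ htw]
          rw [cgPass2_no_lt s h0 hd, hfold]
          simp
        · -- '<' found: normal text, then a garbage body, then (maybe) '>' and the rest
          have hlt : lt = '<' := by
            have := dropWhile_cons_head hd
            simpa using this
          have hsplit : s = s.takeWhile (· ≠ '<') ++ (lt :: afterLt) := by
            conv_lhs => rw [← List.takeWhile_append_dropWhile (p := (· ≠ '<')) (l := s)]
            rw [hd]
          have hbody : ∀ c ∈ afterLt.takeWhile (· ≠ '>'), c ≠ '>' := by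
            intro c hcmem
            have := List.mem_takeWhile_imp hcmem
            simpa using this
          have hlen1 : afterLt.length < s.length := by
            have h1 : (s.dropWhile (· ≠ '<')).length ≤ s.length := List.length_dropWhile_le _ _
            rw [hd] at h1
            simp only [List.length_cons] at h1
            omega
          have hsplit2 : afterLt = afterLt.takeWhile (· ≠ '>') ++ afterLt.dropWhile (· ≠ '>') :=
            (List.takeWhile_append_dropWhile).symm
          have hlen2 : (afterLt.dropWhile (· ≠ '>')).length ≤ afterLt.length :=
            List.length_dropWhile_le _ _
          set kept := (s.takeWhile (· ≠ '<')).filter (fun c => c == '{' || c == '}') with hkept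
          have step_lt : cgStep2 (clean ++ kept, false, cnt) lt = (clean ++ kept, true, cnt) := by
            subst hlt; simp [cgStep2]
          have hfold : List.foldl cgStep2 (clean, false, cnt) s
              = List.foldl cgStep2
                  (clean ++ kept, true, cnt + ((afterLt.takeWhile (· ≠ '>')).length : Int))
                  (afterLt.dropWhile (· ≠ '>')) := by
            conv_lhs => rw [hsplit]
            rw [List.foldl_append, fold2_outside _ htw, ← hkept, List.foldl_cons, step_lt]
            conv_lhs => rw [hsplit2]
            rw [List.foldl_append, fold2_inside _ hbody]
          rw [cgPass2_lt s lt afterLt h0 hd, ← hkept]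
          rcases hd2 : afterLt.dropWhile (· ≠ '>') with _ | ⟨gt, after⟩
          · -- unclosed garbage: runs to the end of the string
            rw [hd2] at hfold
            simp only [List.foldl_nil] at hfold
            rw [hfold]
            simp [cgPass2_nil]
          · have hgt : gt = '>' := by
              have := dropWhile_cons_head hd2
              simpa using this
            have step_gt : cgStep2 (clean ++ kept, true,
                cnt + ((afterLt.takeWhile (· ≠ '>')).length : Int)) gt
                = (clean ++ kept, false,
                   cnt + ((afterLt.takeWhile (· ≠ '>')).length : Int)) := by
              subst hgt; simp [cgStep2]
            rw [hd2, List.foldl_cons, step_gt] at hfold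
            have hlenafter : after.length ≤ n := by
              rw [hd2] at hlen2
              simp only [List.length_cons] at hlen2
              omega
            have ihx := ih after hlenafter (clean ++ kept)
              (cnt + ((afterLt.takeWhile (· ≠ '>')).length : Int))
            rw [hfold]
            simp only [List.drop_succ_cons, List.drop_zero]
            refine ⟨?_, ?_⟩
            · rw [ihx.1]; simp
            · rw [ihx.2]; push_cast; ring

-- ===== VERDICT (by name: the statement is the Claim_ definition above) =====
theorem clean_group_spec : Claim_equal_clean_group := by
  intro group _
  unfold Spec_clean_group clean_group clean_group_alt
  have hA := foldA_unesc group.toList [] false 0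
  have hB := fold2_pass2 (cgUnesc group.toList).length (cgUnesc group.toList) le_rfl [] 0
  have h1 : (List.foldl cgStep ([], false, false, 0) group.toList).1
      = (List.foldl cgStep2 ([], false, 0) (cgUnesc group.toList)).1 := congrArg Prod.fst hA
  have h2 : (List.foldl cgStep ([], false, false, 0) group.toList).2.2.2
      = (List.foldl cgStep2 ([], false, 0) (cgUnesc group.toList)).2.2 := by
    have := congrArg (fun x => x.2.2) hA
    simpa using this
  simp only [h1, h2, hB.1, hB.2]
  simp
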